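-- pv_equiv track=rewrite | github.com/S7-F44-QUBi/skyqubi-public | engine/s7_rag.py | expand_prompt_with_context
-- ===== SOURCE A (Python) =====
-- def expand_prompt_with_context(query: str, chunks: list[dict], max_context_chars: int = 4000) -> str:
--     """Build a RAG-augmented prompt from retrieved chunks."""
--     if not chunks:
--         return query
--
--     context_parts = []
--     total_chars = 0
--     for c in chunks:
--         if total_chars + len(c["content"]) > max_context_chars:
--             break
--         context_parts.append(f"[Source #{c['chunk_id']}]\n{c['content']}")
--         total_chars += len(c["content"])
--
--     context_text = "\n\n---\n\n".join(context_parts)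
--     return (
--         f"Use the following retrieved context to answer the question.\n\n"
--         f"=== CONTEXT ===\n{context_text}\n=== END CONTEXT ===\n\n"
--         f"Question: {query}"
--     )
-- ===== SOURCE B (Python) =====
-- def expand_prompt_with_context(query: str, chunks: list[dict], max_context_chars: int = 4000) -> str:
--     """Build a RAG prompt: cumulative content lengths + binary search for the budget cutoff."""
--     if not chunks:
--         return query
--     # cumulative content lengths (missing content counts as empty)
--     cums = []
--     run = 0
--     for c in chunks:
--         run += len(c.get("content", ""))
--         cums.append(run)
--     # binary search (bisect_right): first index whose cumulative length exceeds the budget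
--     lo, hi = 0, len(cums)
--     while lo < hi:
--         mid = (lo + hi) // 2
--         if cums[mid] <= max_context_chars:
--             lo = mid + 1
--         else:
--             hi = mid
--     parts = ["[Source #{}]\n{}".format(c["chunk_id"], c["content"]) for c in chunks[:lo]]
--     return ("Use the following retrieved context to answer the question.\n\n"
--             "=== CONTEXT ===\n{}\n=== END CONTEXT ===\n\n"
--             "Question: {}").format("\n\n---\n\n".join(parts), query)
-- ===== Notes on version B (the rewrite author's own statement) =====
-- stated objective: alternative
-- what changed: B replaces A's single accumulate-format-break loop by three staged passes: build the list of cumulative content lengths, binary-search (bisect_right) that nondecreasing list for the first cumulative length over the budget, then format and join the chunk slice up to that index; correct because the prefix sums are nondecreasing, so the bisect index equals A's greedy break point.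
import Mathlib
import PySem

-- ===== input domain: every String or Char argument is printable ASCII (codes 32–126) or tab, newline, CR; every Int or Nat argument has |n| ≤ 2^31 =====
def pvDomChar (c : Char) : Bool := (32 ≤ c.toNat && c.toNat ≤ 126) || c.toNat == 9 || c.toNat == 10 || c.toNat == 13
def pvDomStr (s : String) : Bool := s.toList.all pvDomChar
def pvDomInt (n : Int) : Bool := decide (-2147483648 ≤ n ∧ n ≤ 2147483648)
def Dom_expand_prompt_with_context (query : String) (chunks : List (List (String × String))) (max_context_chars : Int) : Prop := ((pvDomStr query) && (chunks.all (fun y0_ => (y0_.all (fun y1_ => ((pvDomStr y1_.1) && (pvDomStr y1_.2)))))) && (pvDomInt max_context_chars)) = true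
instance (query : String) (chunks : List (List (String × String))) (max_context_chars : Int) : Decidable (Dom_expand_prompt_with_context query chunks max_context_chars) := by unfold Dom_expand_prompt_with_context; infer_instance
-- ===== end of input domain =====

-- B rebuilds the prompt in three staged passes — cumulative content lengths, a hand-written
-- binary search (bisect_right) for the first cumulative length over the budget, then
-- format-and-join of the chunk slice — instead of A's single accumulate/format/break loop
-- (objective: alternative, same overall cost).


-- first-match lookup in a dict given as an association list; exact where the key is present
-- (Pre_ guarantees that for every access that Python performs); default "" = dict.get(key, "").
def pvLookup (c : List (String × String)) (key : String) : String :=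
  match c with
  | [] => ""
  | (k, v) :: rest => if k == key then v else pvLookup rest key

-- ===== PORT A =====
-- A's for-loop with break: parts/total are the loop state, the break is the non-recursive branch.
def pvALoop (maxc : Int) : List (List (String × String)) → List String → Int → List String
  | [], parts, _ => parts
  | c :: rest, parts, total =>
      let content := pvLookup c "content"
      if total + PySem.Str.len content > maxc then parts
      else pvALoop maxc rest
        (parts ++ ["[Source #" ++ pvLookup c "chunk_id" ++ "]\n" ++ content])
        (total + PySem.Str.len content)

def expand_prompt_with_context (query : String) (chunks : List (List (String × String))) (max_context_chars : Int) : String :=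
  if chunks.isEmpty then query
  else
    let context_text := PySem.Str.join "\n\n---\n\n" (pvALoop max_context_chars chunks [] 0)
    "Use the following retrieved context to answer the question.\n\n=== CONTEXT ===\n"
      ++ context_text ++ "\n=== END CONTEXT ===\n\nQuestion: " ++ query

-- ===== PORT B =====
-- Source B phase 1: the list of cumulative content lengths (c.get("content","") = pvLookup default "")
def pvCums : List (List (String × String)) → Int → List Int
  | [], _ => []
  | c :: rest, run =>
      let run' := run + PySem.Str.len (pvLookup c "content")
      run' :: pvCums rest run'

-- Source B phase 2: hand-written bisect_right on the cumulative lengths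
def pvBisect (xs : List Int) (x : Int) (lo hi : Nat) : Nat :=
  if _h : lo < hi then
    let mid := (lo + hi) / 2
    if xs.getD mid 0 ≤ x then pvBisect xs x (mid + 1) hi
    else pvBisect xs x lo mid
  else lo
  termination_by hi - lo
  decreasing_by all_goals omega

-- Source B phase 3: the per-chunk format string
def pvBFmt (c : List (String × String)) : String :=
  "[Source #" ++ pvLookup c "chunk_id" ++ "]\n" ++ pvLookup c "content"

def expand_prompt_with_context_alt (query : String) (chunks : List (List (String × String))) (max_context_chars : Int) : String :=
  if chunks.isEmpty then query
  else
    let cums := pvCums chunks 0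
    let lo := pvBisect cums max_context_chars 0 cums.length
    let parts := (chunks.take lo).map pvBFmt
    "Use the following retrieved context to answer the question.\n\n=== CONTEXT ===\n"
      ++ PySem.Str.join "\n\n---\n\n" parts ++ "\n=== END CONTEXT ===\n\nQuestion: " ++ query

-- ===== PRECONDITION & SPEC =====
def pvHasKey (c : List (String × String)) (key : String) : Bool := c.any (fun p => p.1 == key)

-- prefix sum of the content lengths of the first i chunks (missing keys contribute 0; such an
-- index is itself excluded by Pre_ whenever the loop reaches it)
def pvPrefLen (chunks : List (List (String × String))) (i : Nat) : Int :=
  (((chunks.take i).map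
    (fun c => (((c.find? (fun p => p.1 == "content")).map (fun p => p.2)).getD "").length)).sum : Nat)

-- Pre_ = exactly the inputs where A (and B) return without a KeyError: every chunk A's budget loop
-- reaches must carry "content", and every chunk it includes must also carry "chunk_id".
def Pre_expand_prompt_with_context (query : String) (chunks : List (List (String × String))) (max_context_chars : Int) : Prop :=
  ∀ i < chunks.length,
    ((i = 0 ∨ pvPrefLen chunks i ≤ max_context_chars) → pvHasKey (chunks.getD i []) "content" = true) ∧
    (pvPrefLen chunks (i + 1) ≤ max_context_chars → pvHasKey (chunks.getD i []) "chunk_id" = true)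
instance (query : String) (chunks : List (List (String × String))) (max_context_chars : Int) : Decidable (Pre_expand_prompt_with_context query chunks max_context_chars) := by unfold Pre_expand_prompt_with_context; infer_instance

def pvWitness_expand_prompt_with_context : String × (List (List (String × String))) × Int :=
  ("what is QUBi?", [[("chunk_id", "1"), ("content", "abc")], [("content", "defg"), ("chunk_id", "2")]], 5)

def Spec_expand_prompt_with_context (query : String) (chunks : List (List (String × String))) (max_context_chars : Int) (out : String) : Prop := out = expand_prompt_with_context_alt query chunks max_context_chars
instance (query : String) (chunks : List (List (String × String))) (max_context_chars : Int) (out : String) : Decidable (Spec_expand_prompt_with_context query chunks max_context_chars out) := by unfold Spec_expand_prompt_with_context; infer_instance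

-- ===== CLAIM (what is proved, stated in full; the proofs are below) =====
def Claim_equal_expand_prompt_with_context : Prop := ∀ (query : String) (chunks : List (List (String × String))) (max_context_chars : Int), Dom_expand_prompt_with_context query chunks max_context_chars → Pre_expand_prompt_with_context query chunks max_context_chars → Spec_expand_prompt_with_context query chunks max_context_chars (expand_prompt_with_context query chunks max_context_chars)

-- ===== LEMMAS AND PROOFS =====

-- the greedy break point of A's loop, as a standalone count (proof-side helper only)
def pvBCount : List (List (String × String)) → Int → Nat
  | [], _ => 0
  | c :: rest, remaining =>
      let n := PySem.Str.len (pvLookup c "content")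
      if n ≤ remaining then 1 + pvBCount rest (remaining - n) else 0

-- loop invariant: A's break loop appends exactly the formatted take of the greedy count
theorem pvALoop_eq_take (maxc : Int) (chunks : List (List (String × String)))
    (parts : List String) (total : Int) :
    pvALoop maxc chunks parts total
      = parts ++ ((chunks.take (pvBCount chunks (maxc - total))).map pvBFmt) := by
  induction chunks generalizing parts total with
  | nil => simp [pvALoop, pvBCount]
  | cons c rest ih =>
      simp only [pvALoop, pvBCount, PySem.Str.len_eq]
      by_cases h : total + ((pvLookup c "content").toList.length : Int) > maxc
      · rw [if_pos h, if_neg (by omega)]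
        simp
      · rw [if_neg h, if_pos (by omega), ih]
        have heq : maxc - (total + ((pvLookup c "content").toList.length : Int))
            = maxc - total - ((pvLookup c "content").toList.length : Int) := by omega
        rw [heq, Nat.add_comm 1, List.take_succ_cons, List.map_cons]
        simp [pvBFmt]

theorem mem_pvCums_ge (chunks : List (List (String × String))) (acc : Int)
    (s : Int) (hs : s ∈ pvCums chunks acc) : acc ≤ s := by
  induction chunks generalizing acc with
  | nil => simp [pvCums] at hs
  | cons c rest ih =>
      simp only [pvCums, List.mem_cons] at hs
      have hn : (0 : Int) ≤ PySem.Str.len (pvLookup c "content") := by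
        simp [PySem.Str.len_eq]
      rcases hs with h | h
      · omega
      · have := ih _ h; omega

theorem pvCums_sorted (chunks : List (List (String × String))) (acc : Int) :
    (pvCums chunks acc).Pairwise (· ≤ ·) := by
  induction chunks generalizing acc with
  | nil => simp [pvCums]
  | cons c rest ih =>
      simp only [pvCums, List.pairwise_cons]
      exact ⟨fun s hs => mem_pvCums_ge rest _ s hs, ih _⟩

-- the greedy count is the number of cumulative sums within the budget
theorem pvBCount_eq_countP (chunks : List (List (String × String))) (r acc : Int) :
    pvBCount chunks r = (pvCums chunks acc).countP (fun s => decide (s ≤ acc + r)) := by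
  induction chunks generalizing r acc with
  | nil => simp [pvBCount, pvCums]
  | cons c rest ih =>
      simp only [pvBCount, pvCums, List.countP_cons]
      by_cases h : PySem.Str.len (pvLookup c "content") ≤ r
      · rw [if_pos h]
        have : acc + PySem.Str.len (pvLookup c "content") ≤ acc + r := by omega
        simp only [this, decide_true, if_pos]
        have := ih (r - PySem.Str.len (pvLookup c "content"))
          (acc + PySem.Str.len (pvLookup c "content"))
        rw [this]
        have harg : acc + PySem.Str.len (pvLookup c "content")
            + (r - PySem.Str.len (pvLookup c "content")) = acc + r := by omega
        rw [harg]; omega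
      · rw [if_neg h]
        have hhead : ¬ (acc + PySem.Str.len (pvLookup c "content") ≤ acc + r) := by omega
        simp only [hhead, decide_false]
        rw [List.countP_eq_zero.mpr]
        · simp
        · intro s hs
          have := mem_pvCums_ge rest _ s hs
          simp only [decide_eq_true_eq]
          omega

-- countP of a (≤ x)-prefix-shaped sorted list is the prefix length
theorem countP_prefix (x : Int) (xs : List Int) (k : Nat) (hk : k ≤ xs.length)
    (h : ∀ i, (hi : i < xs.length) → (xs[i] ≤ x ↔ i < k)) :
    xs.countP (fun s => decide (s ≤ x)) = k := by
  induction xs generalizing k with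
  | nil => simp only [List.length_nil] at hk; simp only [List.countP_nil]; omega
  | cons a rest ih =>
      rw [List.countP_cons]
      match k with
      | 0 =>
          have ha : ¬ a ≤ x := by
            have := (h 0 (by simp)).mp; simpa using this
          have hrest : rest.countP (fun s => decide (s ≤ x)) = 0 := by
            rw [List.countP_eq_zero]
            intro s hs
            obtain ⟨i, hi, rfl⟩ := List.mem_iff_getElem.mp hs
            have h2 := (h (i + 1) (by simpa using Nat.succ_lt_succ hi)).mp
            simp only [List.getElem_cons_succ] at h2
            simp only [decide_eq_true_eq]
            omega
          simp [ha, hrest]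
      | k' + 1 =>
          have ha : a ≤ x := by
            have := (h 0 (by simp)).mpr (by omega); simpa using this
          have hrest := ih k' (by simpa using hk) (fun i hi => by
            have h2 := h (i + 1) (by simpa using Nat.succ_lt_succ hi)
            simpa [Nat.succ_lt_succ_iff] using h2)
          simp [ha, hrest]

-- bisect_right returns the count of elements ≤ x, given the loop invariants
theorem pvBisect_eq (xs : List Int) (x : Int)
    (hsort : xs.Pairwise (· ≤ ·)) :
    ∀ n lo hi, hi - lo ≤ n → lo ≤ hi → hi ≤ xs.length →
    (∀ i, i < lo → xs.getD i 0 ≤ x) →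
    (∀ i, hi ≤ i → i < xs.length → x < xs.getD i 0) →
    pvBisect xs x lo hi = xs.countP (fun s => decide (s ≤ x)) := by
  intro n
  induction n with
  | zero =>
      intro lo hi hn hlh hhl hlo hhi
      have : lo = hi := by omega
      subst this
      rw [pvBisect, dif_neg (by omega)]
      refine (countP_prefix x xs lo (by omega) ?_).symm
      intro i hi'
      constructor
      · intro hle
        by_contra hge
        have := hhi i (by omega) hi'
        rw [List.getD_eq_getElem?_getD, List.getElem?_eq_getElem hi'] at this
        simp at this; omega
      · intro hlt
        have := hlo i hlt
        rw [List.getD_eq_getElem?_getD, List.getElem?_eq_getElem hi'] at this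
        simpa using this
  | succ n ih =>
      intro lo hi hn hlh hhl hlo hhi
      by_cases hlt : lo < hi
      · rw [pvBisect, dif_pos hlt]
        have hmid1 : lo ≤ (lo + hi) / 2 := by omega
        have hmid2 : (lo + hi) / 2 < hi := by omega
        have hmem : ((lo + hi) / 2) < xs.length := by omega
        have hget : xs.getD ((lo + hi) / 2) 0 = xs[(lo + hi) / 2] := by
          rw [List.getD_eq_getElem?_getD, List.getElem?_eq_getElem hmem]; rfl
        have hmono := List.pairwise_iff_getElem.mp hsort
        by_cases hc : xs.getD ((lo + hi) / 2) 0 ≤ x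
        · rw [if_pos hc]
          exact ih ((lo + hi) / 2 + 1) hi (by omega) (by omega) hhl
            (fun i hi' => by
              by_cases h' : i < lo
              · exact hlo i h'
              · have hi2 : i < xs.length := by omega
                have hgi : xs.getD i 0 = xs[i] := by
                  rw [List.getD_eq_getElem?_getD, List.getElem?_eq_getElem hi2]; rfl
                rw [hgi]
                rcases Nat.lt_or_ge i ((lo + hi) / 2) with h2 | h2
                · have := hmono i ((lo + hi) / 2) hi2 hmem h2
                  rw [hget] at hc; omega
                · have : i = (lo + hi) / 2 := by omega
                  subst this; rw [hget] at hc; omega)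
            hhi
        · rw [if_neg hc]
          exact ih lo ((lo + hi) / 2) (by omega) (by omega) (by omega) hlo
            (fun i hi' hi2 => by
              have hgi : xs.getD i 0 = xs[i] := by
                rw [List.getD_eq_getElem?_getD, List.getElem?_eq_getElem hi2]; rfl
              rw [hgi]
              rcases Nat.lt_or_ge i hi with h2 | h2
              · rcases Nat.eq_or_lt_of_le hi' with h3 | h3
                · subst h3; rw [hget] at hc; omega
                · have := hmono ((lo + hi) / 2) i hmem hi2 h3
                  rw [hget] at hc; omega
              · have h4 := hhi i h2 hi2; omega)
      · have : lo = hi := by omega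
        subst this
        exact ih lo lo (by omega) (by omega) hhl hlo hhi

-- ===== VERDICT (by name: the statement is the Claim_ definition above) =====
theorem expand_prompt_with_context_spec : Claim_equal_expand_prompt_with_context := by
  intro query chunks maxc _ _
  unfold Spec_expand_prompt_with_context
  unfold expand_prompt_with_context expand_prompt_with_context_alt
  by_cases hemp : chunks.isEmpty
  · rw [if_pos hemp, if_pos hemp]
  · rw [if_neg hemp, if_neg hemp]
    show ("Use the following retrieved context to answer the question.\n\n=== CONTEXT ===\n"
          ++ PySem.Str.join "\n\n---\n\n" (pvALoop maxc chunks [] 0)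
          ++ "\n=== END CONTEXT ===\n\nQuestion: " ++ query)
        = ("Use the following retrieved context to answer the question.\n\n=== CONTEXT ===\n"
          ++ PySem.Str.join "\n\n---\n\n" ((chunks.take
              (pvBisect (pvCums chunks 0) maxc 0 (pvCums chunks 0).length)).map pvBFmt)
          ++ "\n=== END CONTEXT ===\n\nQuestion: " ++ query)
    have hbis : pvBisect (pvCums chunks 0) maxc 0 (pvCums chunks 0).length
        = pvBCount chunks maxc := by
      rw [pvBisect_eq (pvCums chunks 0) maxc (pvCums_sorted chunks 0)
        (pvCums chunks 0).length 0 (pvCums chunks 0).length (by omega) (by omega)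
        (by omega) (by omega) (by omega)]
      rw [pvBCount_eq_countP chunks maxc 0]
      simp
    have hA := pvALoop_eq_take maxc chunks [] 0
    rw [sub_zero] at hA
    rw [hbis, hA]
    simp
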